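-- pv_equiv track=rewrite | github.com/gvwilson/sdxpy | lib/mccole/bin/dependencies.py | make_depends
-- ===== SOURCE A (Python) =====
-- def make_depends(chapter_slugs, glossary, index):
--     """Figure out which items depends on which."""
--     index = {slug: entries for (slug, entries) in index.items() if entries}
--     defined = {
--         slug: set(glossary[e[0]] for e in entries if e[0] in glossary)
--         for (slug, entries) in index.items()
--     }
--     indexed = {
--         slug: set(e[0] for e in entries if e[0] not in glossary)
--         for (slug, entries) in index.items()
--     }
--     depends = {
--         i_slug: set(
--             d_slug
--             for (d_slug, d_terms) in defined.items()
--             if i_terms.intersection(d_terms)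
--         )
--         for (i_slug, i_terms) in indexed.items()
--     }
--
--     chapter_slugs = set(chapter_slugs)
--     result = {
--         i_slug: set(d_slug for d_slug in i_depends if d_slug in chapter_slugs)
--         for (i_slug, i_depends) in depends.items()
--         if i_slug in chapter_slugs
--     }
--     return result
-- ===== SOURCE B (Python) =====
-- def make_depends(chapter_slugs, glossary, index):
--     """Figure out which items depends on which."""
--     chapters = set(chapter_slugs)
--     live = [(slug, entries) for (slug, entries) in index.items() if entries]
--     # inverted index: defined term (a glossary value) -> set of slugs whose entries define it
--     definers = {}
--     for slug, entries in live:
--         for e in entries: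
--             t = glossary.get(e[0])
--             if t is not None:
--                 definers.setdefault(t, set()).add(slug)
--     d_order = [slug for (slug, _) in live]
--     result = {}
--     for slug, entries in live:
--         if slug in chapters:
--             deps = set()
--             for e in entries:
--                 if e[0] not in glossary:
--                     deps.update(definers.get(e[0], set()))
--             result[slug] = set(d for d in d_order if d in deps and d in chapters)
--     return result
-- ===== Notes on version B (the rewrite author's own statement) =====
-- stated objective: faster
-- what changed: Instead of intersecting every indexed chapter's term set with every defining chapter's term set (all-pairs set intersections), B builds one inverted index from each defined glossary term to the set of slugs defining it, unions those definer sets per indexed raw term, and emits each result set with one ordered filter pass over the slug order.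
import Mathlib
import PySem

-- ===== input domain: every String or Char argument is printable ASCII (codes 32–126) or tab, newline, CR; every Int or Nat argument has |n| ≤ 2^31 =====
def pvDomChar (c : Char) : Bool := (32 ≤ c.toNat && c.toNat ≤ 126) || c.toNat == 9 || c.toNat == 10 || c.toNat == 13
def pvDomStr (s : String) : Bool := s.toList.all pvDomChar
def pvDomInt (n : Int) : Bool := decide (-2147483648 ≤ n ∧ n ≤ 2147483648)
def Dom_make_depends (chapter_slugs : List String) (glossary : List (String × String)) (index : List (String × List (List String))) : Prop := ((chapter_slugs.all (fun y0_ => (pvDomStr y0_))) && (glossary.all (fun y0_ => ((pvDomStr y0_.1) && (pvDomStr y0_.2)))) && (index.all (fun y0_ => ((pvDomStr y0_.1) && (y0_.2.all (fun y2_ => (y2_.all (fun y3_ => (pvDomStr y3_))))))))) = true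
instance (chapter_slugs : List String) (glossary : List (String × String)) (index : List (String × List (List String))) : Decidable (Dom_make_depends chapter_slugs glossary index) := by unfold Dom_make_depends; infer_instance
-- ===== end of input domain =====

-- B replaces A's all-pairs term-set intersections by an inverted defined-term → definer-slugs
-- index plus one ordered filter pass per result set (objective: faster, measured by the check).

-- ===== PORT A =====
-- dict arguments arrive as association lists; PySem.Dict.ofList rebuilds the dict the Python
-- caller passes.  'e.headD ""' ports e[0]: Pre_ guarantees e ≠ [] (so the default is never read).
-- A-side helpers: the two set comprehensions of A's 'defined' / 'indexed' dict comprehensions.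
def pvA_dset (g : PySem.Dict String String) (entries : List (List String)) : PySem.Set String :=
  PySem.Set.ofList ((entries.filter (fun e => g.contains (e.headD ""))).map
    (fun e => g.getD (e.headD "") ""))
def pvA_iset (g : PySem.Dict String String) (entries : List (List String)) : PySem.Set String :=
  PySem.Set.ofList ((entries.filter (fun e => !g.contains (e.headD ""))).map
    (fun e => e.headD ""))

def make_depends (chapter_slugs : List String) (glossary : List (String × String)) (index : List (String × List (List String))) : List (String × List String) :=
  let g : PySem.Dict String String := PySem.Dict.ofList glossary
  -- index = {slug: entries for (slug, entries) in index.items() if entries}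
  let idx : PySem.Dict String (List (List String)) :=
    (PySem.Dict.ofList index).items.foldl
      (fun d p => if !p.2.isEmpty then d.insert p.1 p.2 else d) PySem.Dict.empty
  -- defined = {slug: set(glossary[e[0]] for e in entries if e[0] in glossary) ...}
  let defined : PySem.Dict String (PySem.Set String) :=
    idx.items.foldl (fun d p => d.insert p.1 (pvA_dset g p.2)) PySem.Dict.empty
  -- indexed = {slug: set(e[0] for e in entries if e[0] not in glossary) ...}
  let indexed : PySem.Dict String (PySem.Set String) :=
    idx.items.foldl (fun d p => d.insert p.1 (pvA_iset g p.2)) PySem.Dict.empty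
  -- depends = {i_slug: set(d_slug for (d_slug, d_terms) in defined.items() if i_terms & d_terms) ...}
  let depends : PySem.Dict String (PySem.Set String) :=
    indexed.items.foldl
      (fun d p => d.insert p.1
        (PySem.Set.ofList ((defined.items.filter
          (fun q => !(PySem.Set.inter p.2 q.2).isEmpty)).map (fun q => q.1)))) PySem.Dict.empty
  -- chapter_slugs = set(chapter_slugs); result = { filtered } ; return result
  let chapters : PySem.Set String := PySem.Set.ofList chapter_slugs
  let result : PySem.Dict String (PySem.Set String) :=
    depends.items.foldl
      (fun d p => if chapters.contains p.1 then
          d.insert p.1 (PySem.Set.ofList (p.2.filter (fun s => chapters.contains s)))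
        else d) PySem.Dict.empty
  result.items

-- ===== PORT B =====
-- Literal port of Source B; the two inner loops are the helpers below.
-- definers: for slug, entries in live: for e in entries:
--   t = glossary.get(e[0]); if t is not None: definers.setdefault(t, set()).add(slug)
def pvB_definers (g : PySem.Dict String String) (live : List (String × List (List String))) :
    PySem.Dict String (PySem.Set String) :=
  live.foldl
    (fun d p => p.2.foldl
      (fun d e => match g.get? (e.headD "") with
        | some t => d.modify t PySem.Set.empty (fun s => PySem.Set.add s p.1)
        | none => d) d) PySem.Dict.empty
-- deps: for e in entries: if e[0] not in glossary: deps.update(definers.get(e[0], set()))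
def pvB_deps (g : PySem.Dict String String) (dfs : PySem.Dict String (PySem.Set String))
    (entries : List (List String)) : PySem.Set String :=
  entries.foldl
    (fun s e => if g.contains (e.headD "") then s
      else PySem.Set.update s (dfs.getD (e.headD "") PySem.Set.empty)) PySem.Set.empty

def make_depends_alt (chapter_slugs : List String) (glossary : List (String × String)) (index : List (String × List (List String))) : List (String × List String) :=
  let g : PySem.Dict String String := PySem.Dict.ofList glossary
  let chapters : PySem.Set String := PySem.Set.ofList chapter_slugs
  -- live = [(slug, entries) for (slug, entries) in index.items() if entries]
  let live : List (String × List (List String)) :=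
    (PySem.Dict.ofList index).items.filter (fun p => !p.2.isEmpty)
  let definers : PySem.Dict String (PySem.Set String) := pvB_definers g live
  -- d_order = [slug for (slug, _) in live]
  let d_order : List String := live.map (fun p => p.1)
  -- for slug, entries in live: if slug in chapters:
  --   deps = …; result[slug] = set(d for d in d_order if d in deps and d in chapters)
  let result : PySem.Dict String (PySem.Set String) :=
    live.foldl
      (fun r p => if chapters.contains p.1 then
          r.insert p.1 (PySem.Set.ofList (d_order.filter
            (fun dsl => PySem.Set.contains (pvB_deps g definers p.2) dsl && chapters.contains dsl)))
        else r) PySem.Dict.empty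
  result.items

-- ===== PRECONDITION & SPEC =====
-- Pre_ excludes exactly the inputs on which A raises IndexError: a slug kept by Python's dict()
-- (duplicate keys overwrite) whose entry list contains an empty entry e, where e[0] raises.
def Pre_make_depends (chapter_slugs : List String) (glossary : List (String × String)) (index : List (String × List (List String))) : Prop :=
  ∀ p ∈ (PySem.Dict.ofList index).items, ∀ e ∈ p.2, e ≠ []
instance (chapter_slugs : List String) (glossary : List (String × String)) (index : List (String × List (List String))) : Decidable (Pre_make_depends chapter_slugs glossary index) := by unfold Pre_make_depends; infer_instance

def pvWitness_make_depends : List String × (List (String × String)) × (List (String × List (List String))) :=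
  (["intro", "data"], [("tr", "tree")], [("intro", [["tr"], ["node"]]), ("data", [["node"]])])

def Spec_make_depends (chapter_slugs : List String) (glossary : List (String × String)) (index : List (String × List (List String))) (out : List (String × List String)) : Prop := out = make_depends_alt chapter_slugs glossary index
instance (chapter_slugs : List String) (glossary : List (String × String)) (index : List (String × List (List String))) (out : List (String × List String)) : Decidable (Spec_make_depends chapter_slugs glossary index out) := by unfold Spec_make_depends; infer_instance

-- ===== CLAIM (what is proved, stated in full; the proofs are below) =====
def Claim_equal_make_depends : Prop := ∀ (chapter_slugs : List String) (glossary : List (String × String)) (index : List (String × List (List String))), Dom_make_depends chapter_slugs glossary index → Pre_make_depends chapter_slugs glossary index → Spec_make_depends chapter_slugs glossary index (make_depends chapter_slugs glossary index)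

-- ===== LEMMAS AND PROOFS =====

-- A fold inserting under a condition, with fresh distinct keys, appends the filtered pairs.
theorem pv_foldl_insert_if_items {β γ : Type} (cond : String × β → Bool) (f : String × β → γ) :
    ∀ (l : List (String × β)) (d : PySem.Dict String γ),
      (l.map (fun p => p.1)).Nodup → (∀ p ∈ l, d.contains p.1 = false) →
      (l.foldl (fun d p => if cond p then d.insert p.1 (f p) else d) d).items
        = d.items ++ (l.filter cond).map (fun p => (p.1, f p)) := by
  intro l
  induction l with
  | nil => intro d _ _; simp
  | cons p l ih =>
    intro d hnd hf
    simp only [List.map_cons, List.nodup_cons] at hnd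
    cases hc : cond p with
    | false =>
      simp only [List.foldl_cons, Bool.false_eq_true, if_false, List.filter_cons, hc]
      exact ih d hnd.2 (fun q hq => hf q (List.mem_cons_of_mem _ hq))
    | true =>
      simp only [List.foldl_cons, hc, if_true, List.filter_cons, List.map_cons]
      rw [ih (d.insert p.1 (f p)) hnd.2]
      · rw [PySem.Dict.items_insert_of_not_contains _ _ (hf p (List.mem_cons_self ..))]
        simp
      · intro q hq
        rw [PySem.Dict.contains_insert]
        have : q.1 ≠ p.1 := by
          intro h; exact hnd.1 (h ▸ List.mem_map_of_mem hq)
        simp [this, hf q (List.mem_cons_of_mem _ hq)]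

-- Membership in a definers bucket after the inner (per-entry) loop.
theorem pv_definers_inner (g : PySem.Dict String String) (slug : String)
    (entries : List (List String)) :
    ∀ (d : PySem.Dict String (PySem.Set String)) (t x : String),
      (x ∈ (entries.foldl
        (fun d e => match g.get? (e.headD "") with
          | some t' => d.modify t' PySem.Set.empty (fun s => PySem.Set.add s slug)
          | none => d) d).getD t PySem.Set.empty
      ↔ x ∈ d.getD t PySem.Set.empty
          ∨ (x = slug ∧ ∃ e ∈ entries, g.get? (e.headD "") = some t)) := by
  induction entries with
  | nil => intro d t x; simp
  | cons e es ih =>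
    intro d t x
    simp only [List.foldl_cons, List.exists_mem_cons_iff]
    cases hg : g.get? (e.headD "") with
    | none =>
      rw [ih]
      simp only [reduceCtorEq, and_or_left]
      tauto
    | some t' =>
      rw [ih, PySem.Dict.getD_modify]
      simp only [Option.some.injEq]
      by_cases ht : t = t'
      · subst ht
        simp [PySem.Set.mem_add]
        try tauto
      · simp [if_neg ht, Ne.symm ht]
        try tauto

-- Membership in a definers bucket.
theorem pv_definers_mem (g : PySem.Dict String String)
    (L : List (String × List (List String))) (t x : String) :
    x ∈ (pvB_definers g L).getD t PySem.Set.empty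
      ↔ ∃ p ∈ L, x = p.1 ∧ ∃ e ∈ p.2, g.get? (e.headD "") = some t := by
  unfold pvB_definers
  suffices h : ∀ (d : PySem.Dict String (PySem.Set String)),
      x ∈ (L.foldl
        (fun d p => p.2.foldl
          (fun d e => match g.get? (e.headD "") with
            | some t' => d.modify t' PySem.Set.empty (fun s => PySem.Set.add s p.1)
            | none => d) d) d).getD t PySem.Set.empty
      ↔ x ∈ d.getD t PySem.Set.empty
          ∨ ∃ p ∈ L, x = p.1 ∧ ∃ e ∈ p.2, g.get? (e.headD "") = some t by
    rw [h PySem.Dict.empty]; simp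
  induction L with
  | nil => intro d; simp
  | cons p ps ih =>
    intro d
    simp only [List.foldl_cons, List.exists_mem_cons_iff]
    rw [ih, pv_definers_inner]
    rw [or_assoc]

-- Membership in B's per-chapter deps set.
theorem pv_deps_mem (g : PySem.Dict String String) (dfs : PySem.Dict String (PySem.Set String))
    (entries : List (List String)) (x : String) :
    x ∈ pvB_deps g dfs entries
      ↔ ∃ e ∈ entries, g.contains (e.headD "") = false
          ∧ x ∈ dfs.getD (e.headD "") PySem.Set.empty := by
  unfold pvB_deps
  suffices h : ∀ (s : PySem.Set String),
      x ∈ entries.foldl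
        (fun s e => if g.contains (e.headD "") then s
          else PySem.Set.update s (dfs.getD (e.headD "") PySem.Set.empty)) s
      ↔ x ∈ s ∨ ∃ e ∈ entries, g.contains (e.headD "") = false
          ∧ x ∈ dfs.getD (e.headD "") PySem.Set.empty by
    rw [h PySem.Set.empty]; simp [PySem.Set.empty]
  induction entries with
  | nil => intro s; simp
  | cons e es ih =>
    intro s
    simp only [List.foldl_cons, List.exists_mem_cons_iff]
    cases hc : g.contains (e.headD "") with
    | true =>
      simp only [Bool.true_eq_false, false_and]
      rw [ih]
      tauto
    | false =>
      simp only [Bool.false_eq_true, if_false, true_and]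
      rw [ih]
      simp only [PySem.Set.mem_update]
      tauto

-- get? vs (contains, getD)
theorem pv_get?_iff (g : PySem.Dict String String) (k t : String) :
    g.get? k = some t ↔ g.contains k = true ∧ g.getD k "" = t := by
  rw [PySem.Dict.contains_eq_isSome_get?, PySem.Dict.getD_eq_get?_getD]
  cases h : g.get? k <;> simp

-- The per-pair condition of A equals B's membership test.
theorem pv_cond_eq (g : PySem.Dict String String) (L : List (String × List (List String)))
    (hnd : (L.map (fun p => p.1)).Nodup) (p q : String × List (List String))
    (hq : q ∈ L) :
    (!(PySem.Set.inter (pvA_iset g p.2) (pvA_dset g q.2)).isEmpty)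
      = PySem.Set.contains (pvB_deps g (pvB_definers g L) p.2) q.1 := by
  rw [Bool.eq_iff_iff]
  rw [PySem.Set.contains_iff, pv_deps_mem]
  rw [Bool.not_eq_eq_eq_not, Bool.not_true, List.isEmpty_eq_false_iff_exists_mem]
  constructor
  · rintro ⟨t, ht⟩
    rw [PySem.Set.mem_inter] at ht
    obtain ⟨hti, htd⟩ := ht
    simp only [pvA_iset, PySem.Set.mem_ofList, List.mem_map, List.mem_filter] at hti
    obtain ⟨e, ⟨he, hce⟩, rfl⟩ := hti
    simp only [pvA_dset, PySem.Set.mem_ofList, List.mem_map, List.mem_filter] at htd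
    obtain ⟨e', ⟨he', hce'⟩, hge'⟩ := htd
    refine ⟨e, he, by simpa using hce, ?_⟩
    rw [pv_definers_mem]
    exact ⟨q, hq, rfl, e', he', (pv_get?_iff g _ _).mpr ⟨hce', hge'⟩⟩
  · rintro ⟨e, he, hce, hmem⟩
    rw [pv_definers_mem] at hmem
    obtain ⟨p', hp', hq1, e', he', hge'⟩ := hmem
    have : p' = q := List.inj_on_of_nodup_map hnd hp' hq hq1.symm
    subst this
    refine ⟨e.headD "", ?_⟩
    rw [PySem.Set.mem_inter]
    constructor
    · simp only [pvA_iset, PySem.Set.mem_ofList, List.mem_map, List.mem_filter]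
      exact ⟨e, ⟨he, by simpa using hce⟩, rfl⟩
    · obtain ⟨hc', hg'⟩ := (pv_get?_iff g _ _).mp hge'
      simp only [pvA_dset, PySem.Set.mem_ofList, List.mem_map, List.mem_filter]
      exact ⟨e', ⟨he', hc'⟩, hg'⟩

theorem pv_items_empty {γ : Type} : (PySem.Dict.empty : PySem.Dict String γ).items = [] := rfl

-- The per-slug result value of A equals that of B.
theorem pv_value_eq (g : PySem.Dict String String) (chapters : PySem.Set String)
    (L : List (String × List (List String))) (hnd : (L.map (fun p => p.1)).Nodup)
    (p : String × List (List String)) :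
    PySem.Set.ofList ((PySem.Set.ofList
        (((L.map (fun q => (q.1, pvA_dset g q.2))).filter
          (fun q => !(PySem.Set.inter (pvA_iset g p.2) q.2).isEmpty)).map (fun q => q.1))).filter
      (fun s => chapters.contains s))
    = PySem.Set.ofList ((L.map (fun q => q.1)).filter
        (fun dsl => PySem.Set.contains (pvB_deps g (pvB_definers g L) p.2) dsl
          && chapters.contains dsl)) := by
  rw [List.filter_map, List.map_map]
  have hX : ((L.filter ((fun q => !(PySem.Set.inter (pvA_iset g p.2) q.2).isEmpty) ∘
      (fun q => (q.1, pvA_dset g q.2)))).map ((fun q => q.1) ∘ (fun q => (q.1, pvA_dset g q.2))))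
      = (L.filter (fun q => !(PySem.Set.inter (pvA_iset g p.2) (pvA_dset g q.2)).isEmpty)).map
          (fun q => q.1) := rfl
  rw [hX]
  have hsubnd : ∀ (c : String × List (List String) → Bool),
      ((L.filter c).map (fun q => q.1)).Nodup :=
    fun c => List.Nodup.sublist (List.Sublist.map _ List.filter_sublist) hnd
  rw [PySem.Set.ofList_eq_self_of_nodup _ (hsubnd _)]
  rw [List.filter_map, List.filter_filter]
  rw [PySem.Set.ofList_eq_self_of_nodup _ (hsubnd _)]
  rw [List.filter_map]
  rw [PySem.Set.ofList_eq_self_of_nodup _ (hsubnd _)]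
  congr 1
  apply List.filter_congr
  intro q hq
  simp only [Function.comp_apply]
  rw [pv_cond_eq g L hnd p q hq, Bool.and_comm]

-- ===== VERDICT (by name: the statement is the Claim_ definition above) =====
theorem make_depends_spec : Claim_equal_make_depends := by
  unfold Claim_equal_make_depends
  intro cs gl ix _ _
  unfold Spec_make_depends
  simp only [make_depends, make_depends_alt]
  set g : PySem.Dict String String := PySem.Dict.ofList gl with hg
  set L : List (String × List (List String)) :=
    (PySem.Dict.ofList ix).items.filter (fun p => !p.2.isEmpty) with hLdef
  have hnd0 : ((PySem.Dict.ofList ix).items.map (fun p => p.1)).Nodup := by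
    have h := PySem.Dict.nodup_keys_ofList (ν := List (List String)) ix
    simpa [PySem.Dict.keys] using h
  have hndL : (L.map (fun p => p.1)).Nodup :=
    List.Nodup.sublist (List.Sublist.map _ List.filter_sublist) hnd0
  -- A's rebuilt index dict has items L
  have hidx : ((PySem.Dict.ofList ix).items.foldl
      (fun d p => if !p.2.isEmpty then d.insert p.1 p.2 else d)
      PySem.Dict.empty).items = L := by
    rw [pv_foldl_insert_if_items (cond := fun p => !p.2.isEmpty) (f := fun p => p.2)
      (PySem.Dict.ofList ix).items PySem.Dict.empty hnd0 (by simp)]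
    simp [hLdef, pv_items_empty]
  rw [hidx]
  -- defined and indexed
  rw [PySem.Dict.items_foldl_insert_fresh (k := fun p => p.1) (v := fun p => pvA_dset g p.2)
    L PySem.Dict.empty (by simp) hndL]
  rw [PySem.Dict.items_foldl_insert_fresh (k := fun p => p.1) (v := fun p => pvA_iset g p.2)
    L PySem.Dict.empty (by simp) hndL]
  simp only [pv_items_empty, List.nil_append]
  -- depends: a fold over L.map (fun p => (p.1, pvA_iset g p.2))
  rw [PySem.Dict.items_foldl_insert_fresh (k := fun p => p.1)
    (v := fun p => PySem.Set.ofList (((L.map (fun q => (q.1, pvA_dset g q.2))).filter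
      (fun q => !(PySem.Set.inter p.2 q.2).isEmpty)).map (fun q => q.1)))
    (L.map (fun p => (p.1, pvA_iset g p.2))) PySem.Dict.empty (by simp)
    (by rw [List.map_map]; exact hndL)]
  simp only [pv_items_empty, List.nil_append, List.map_map]
  -- both result folds
  rw [pv_foldl_insert_if_items (cond := fun p => (PySem.Set.ofList cs).contains p.1)
    (f := fun p => PySem.Set.ofList (p.2.filter (fun s => (PySem.Set.ofList cs).contains s)))
    (List.map ((fun a => (a.1, PySem.Set.ofList (List.map (fun q => q.1)
      (List.filter (fun q => !List.isEmpty (a.2.inter q.2))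
        (List.map (fun q => (q.1, pvA_dset g q.2)) L))))) ∘ fun p => (p.1, pvA_iset g p.2)) L)
    PySem.Dict.empty
    (by simp only [List.map_map, Function.comp_def]; simpa using hndL) (by simp)]
  rw [pv_foldl_insert_if_items (cond := fun p => (PySem.Set.ofList cs).contains p.1)
    (f := fun p => PySem.Set.ofList ((L.map (fun q => q.1)).filter
      (fun dsl => PySem.Set.contains (pvB_deps g (pvB_definers g L) p.2) dsl
        && (PySem.Set.ofList cs).contains dsl)))
    L PySem.Dict.empty hndL (by simp)]
  simp only [pv_items_empty, List.nil_append]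
  rw [List.filter_map]
  rw [List.map_map]
  apply List.map_congr_left
  intro p hp
  have hpL : p ∈ L := List.mem_of_mem_filter hp
  simp only [Function.comp]
  refine Prod.ext rfl ?_
  exact pv_value_eq g (PySem.Set.ofList cs) L hndL p
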